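-- pv_equiv track=rewrite | github.com/ahmednagra/Shah-House | May 24/AmaAssn Medical Scraper/amaassn_medical/amaassn_medical/spiders/amaassn.py | get_resident_evaluation
-- ===== SOURCE A (Python) =====
-- def get_resident_evaluation(item, thing):
--     item['Patient Surveys'] = False
--     item['Portfolio System'] = False
--     item['OSCE'] = False
--
--     temporary = thing.get('field_evaluate_res_fellow_2019', [])
--
--     for i in range(4):
--         try:
--             if temporary[i] == 'Patient surveys':
--                 item['Patient Surveys'] = True
--
--             elif temporary[i] == 'Portfolio system':
--                 item['Portfolio System'] = True
--
--             elif temporary[i] == 'Objective structured clinical examinations (OSCE)':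
--                 item['OSCE'] = True
--
--             else:
--                 a = ''
--
--         except IndexError:
--             break
--
--     return item
-- ===== SOURCE B (Python) =====
-- def get_resident_evaluation(item, thing):
--     first4 = thing.get('field_evaluate_res_fellow_2019', [])[:4]
--     item['Patient Surveys'] = 'Patient surveys' in first4
--     item['Portfolio System'] = 'Portfolio system' in first4
--     item['OSCE'] = 'Objective structured clinical examinations (OSCE)' in first4
--     return item
-- ===== Notes on version B (the rewrite author's own statement) =====
-- stated objective: simpler
-- what changed: Replaces the index-driven try/except dispatch loop by one [:4] slice and three direct membership-test assignments, removing the loop, the branching and the exception handling entirely.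
import Mathlib
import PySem

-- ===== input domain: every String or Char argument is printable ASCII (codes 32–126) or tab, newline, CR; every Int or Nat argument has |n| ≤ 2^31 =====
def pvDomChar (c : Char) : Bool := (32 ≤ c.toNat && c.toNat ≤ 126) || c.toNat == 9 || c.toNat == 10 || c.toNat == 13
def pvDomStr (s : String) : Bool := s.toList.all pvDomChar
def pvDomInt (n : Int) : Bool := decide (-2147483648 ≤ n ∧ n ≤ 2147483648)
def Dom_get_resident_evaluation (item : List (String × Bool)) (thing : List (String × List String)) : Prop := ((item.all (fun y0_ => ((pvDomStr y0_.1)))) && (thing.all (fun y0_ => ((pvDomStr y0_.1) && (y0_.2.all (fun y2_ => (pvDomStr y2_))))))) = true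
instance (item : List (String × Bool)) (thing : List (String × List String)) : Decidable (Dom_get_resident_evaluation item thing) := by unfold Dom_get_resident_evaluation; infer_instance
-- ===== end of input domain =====

-- B replaces A's index-driven try/except dispatch loop by a [:4] slice and three direct
-- membership-test assignments (objective: simpler). A mutates `item` in place; the equivalence
-- proved here is about the returned dict (which is the same object).

-- ===== PORT A =====
-- the body of A's loop: the if/elif dispatch on one element (the final 'else: a = ""' is a no-op)
def pvStepA (d : PySem.Dict String Bool) (t : String) : PySem.Dict String Bool :=
  if t = "Patient surveys" then d.insert "Patient Surveys" true
  else if t = "Portfolio system" then d.insert "Portfolio System" true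
  else if t = "Objective structured clinical examinations (OSCE)" then d.insert "OSCE" true
  else d

-- 'for i in range(4): try: … temporary[i] … except IndexError: break'
def pvLoopA (temporary : List String) : List Int → PySem.Dict String Bool → PySem.Dict String Bool
  | [], d => d
  | i :: rest, d =>
    match PySem.List.pyGet? temporary i with
    | none => d                       -- IndexError: break
    | some t => pvLoopA temporary rest (pvStepA d t)

def get_resident_evaluation (item : List (String × Bool)) (thing : List (String × List String)) : List (String × Bool) :=
  let d0 := PySem.Dict.mk item
  let d1 := ((d0.insert "Patient Surveys" false).insert "Portfolio System" false).insert "OSCE" false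
  let temporary := (PySem.Dict.mk thing).getD "field_evaluate_res_fellow_2019" []
  (pvLoopA temporary (PySem.List.pyRange 0 4 1) d1).items

-- ===== PORT B =====
def get_resident_evaluation_alt (item : List (String × Bool)) (thing : List (String × List String)) : List (String × Bool) :=
  let first4 := PySem.List.slice ((PySem.Dict.mk thing).getD "field_evaluate_res_fellow_2019" []) none (some 4)
  let d := PySem.Dict.mk item
  (((d.insert "Patient Surveys" (first4.contains "Patient surveys")).insert
      "Portfolio System" (first4.contains "Portfolio system")).insert
      "OSCE" (first4.contains "Objective structured clinical examinations (OSCE)")).items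

-- ===== PRECONDITION & SPEC =====
def Spec_get_resident_evaluation (item : List (String × Bool)) (thing : List (String × List String)) (out : List (String × Bool)) : Prop := out = get_resident_evaluation_alt item thing
instance (item : List (String × Bool)) (thing : List (String × List String)) (out : List (String × Bool)) : Decidable (Spec_get_resident_evaluation item thing out) := by unfold Spec_get_resident_evaluation; infer_instance

-- ===== CLAIM (what is proved, stated in full; the proofs are below) =====
def Claim_equal_get_resident_evaluation : Prop := ∀ (item : List (String × Bool)) (thing : List (String × List String)), Dom_get_resident_evaluation item thing → Spec_get_resident_evaluation item thing (get_resident_evaluation item thing)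

-- ===== LEMMAS AND PROOFS =====

-- inserting at a key already present is an in-place update, so it commutes with any insert at another key
theorem pv_insert_comm_of_contains {κ ν : Type} [BEq κ] [LawfulBEq κ]
    (d : PySem.Dict κ ν) (k k' : κ) (v v' : ν)
    (hc : d.contains k = true) (hne : (k' == k) = false) :
    (d.insert k' v').insert k v = (d.insert k v).insert k' v' := by
  have hkk' : (k == k') = false := by
    cases h : k == k' with
    | false => rfl
    | true => rw [eq_of_beq h] at hne; simp at hne
  have hc' : (d.insert k' v').contains k = true := by
    simp [PySem.Dict.contains_insert, hc]
  have hck : (d.insert k v).contains k' = d.contains k' := by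
    simp [PySem.Dict.contains_insert, hne]
  apply PySem.Dict.ext
  rw [PySem.Dict.items_insert_of_contains _ _ hc']
  by_cases hk' : d.contains k' = true
  · rw [PySem.Dict.items_insert_of_contains _ _ hk',
        PySem.Dict.items_insert_of_contains _ _ (by rw [hck]; exact hk'),
        PySem.Dict.items_insert_of_contains _ _ hc]
    simp only [List.map_map]
    apply List.map_congr_left
    intro p _
    simp only [Function.comp]
    by_cases h1 : (p.1 == k) = true
    · have h2 : (p.1 == k') = false := by
        cases hb : p.1 == k' with
        | false => rfl
        | true => rw [← eq_of_beq hb, eq_of_beq h1] at hkk'; simp at hkk'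
      simp [h1, h2, hkk']
    · have h1f : (p.1 == k) = false := by simpa using h1
      by_cases h2 : (p.1 == k') = true
      · simp [h1f, h2, hne]
      · have h2f : (p.1 == k') = false := by simpa using h2
        simp [h1f, h2f]
  · have hk'f : d.contains k' = false := by simpa using hk'
    have hck2 : (d.insert k v).contains k' = false := by rw [hck]; exact hk'f
    rw [PySem.Dict.items_insert_of_not_contains _ _ hk'f,
        PySem.Dict.items_insert_of_not_contains _ _ hck2,
        PySem.Dict.items_insert_of_contains _ _ hc]
    simp
    intro h
    rw [h] at hne
    simp at hne

-- folding A's dispatch step over a list, starting from a dict whose three flags were just written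
theorem pv_fold_step (l : List String) (d : PySem.Dict String Bool) (b1 b2 b3 : Bool) :
    l.foldl pvStepA
      (((d.insert "Patient Surveys" b1).insert "Portfolio System" b2).insert "OSCE" b3)
    = ((d.insert "Patient Surveys" (b1 || l.contains "Patient surveys")).insert
         "Portfolio System" (b2 || l.contains "Portfolio system")).insert
         "OSCE" (b3 || l.contains "Objective structured clinical examinations (OSCE)") := by
  induction l generalizing d b1 b2 b3 with
  | nil => simp
  | cons x l ih =>
    have c1 : ((d.insert "Patient Surveys" b1).insert "Portfolio System" b2).contains "Patient Surveys" = true := by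
      simp [PySem.Dict.contains_insert]
    have c2 : (d.insert "Patient Surveys" b1).contains "Patient Surveys" = true :=
      PySem.Dict.contains_insert_self _ _ _
    have c3 : ((d.insert "Patient Surveys" b1).insert "Portfolio System" b2).contains "Portfolio System" = true := by
      simp [PySem.Dict.contains_insert]
    simp only [List.foldl_cons]
    by_cases h1 : x = "Patient surveys"
    · rw [show pvStepA (((d.insert "Patient Surveys" b1).insert "Portfolio System" b2).insert "OSCE" b3) x
            = ((((d.insert "Patient Surveys" b1).insert "Portfolio System" b2).insert "OSCE" b3).insert "Patient Surveys" true) by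
          simp [pvStepA, h1],
        pv_insert_comm_of_contains _ _ _ _ _ c1 (by decide),
        pv_insert_comm_of_contains _ _ _ _ _ c2 (by decide),
        PySem.Dict.insert_insert_self, ih]
      simp [h1]
    · by_cases h2 : x = "Portfolio system"
      · rw [show pvStepA (((d.insert "Patient Surveys" b1).insert "Portfolio System" b2).insert "OSCE" b3) x
              = ((((d.insert "Patient Surveys" b1).insert "Portfolio System" b2).insert "OSCE" b3).insert "Portfolio System" true) by
            simp [pvStepA, h1, h2],
          pv_insert_comm_of_contains _ _ _ _ _ c3 (by decide),
          PySem.Dict.insert_insert_self, ih]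
        simp [h1, h2]
      · by_cases h3 : x = "Objective structured clinical examinations (OSCE)"
        · rw [show pvStepA (((d.insert "Patient Surveys" b1).insert "Portfolio System" b2).insert "OSCE" b3) x
                = ((((d.insert "Patient Surveys" b1).insert "Portfolio System" b2).insert "OSCE" b3).insert "OSCE" true) by
              simp [pvStepA, h1, h2, h3],
            PySem.Dict.insert_insert_self, ih]
          simp [h3]
        · rw [show pvStepA (((d.insert "Patient Surveys" b1).insert "Portfolio System" b2).insert "OSCE" b3) x
                = (((d.insert "Patient Surveys" b1).insert "Portfolio System" b2).insert "OSCE" b3) by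
              simp [pvStepA, h1, h2, h3],
            ih]
          simp [Ne.symm h1, Ne.symm h2, Ne.symm h3]

-- A's range(4)/IndexError loop is a fold over the first four elements
theorem pv_loopA_eq_fold (temporary : List String) (d : PySem.Dict String Bool) :
    pvLoopA temporary (PySem.List.pyRange 0 4 1) d = (temporary.take 4).foldl pvStepA d := by
  have hr : PySem.List.pyRange 0 4 1 = [0, 1, 2, 3] := by decide
  rw [hr]
  match temporary with
  | [] => rfl
  | [a] => rfl
  | [a, b] => rfl
  | [a, b, c] => rfl
  | a :: b :: c :: e :: rest =>
    have h0 : (0:Int) ≤ (rest.length:Int) + 1 + 1 + 1 := by positivity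
    have h1' : (0:Int) ≤ (rest.length:Int) + 1 + 1 := by positivity
    have h2' : (2:Int) ≤ (rest.length:Int) + 1 + 1 + 1 := by omega
    have h3' : (3:Int) ≤ (rest.length:Int) + 1 + 1 + 1 := by omega
    simp [pvLoopA, PySem.List.pyGet?, PySem.List.pyIdx?, List.take, h0, h1', h2', h3']

-- ===== VERDICT (by name: the statement is the Claim_ definition above) =====
theorem get_resident_evaluation_spec : Claim_equal_get_resident_evaluation := by
  intro item thing _
  unfold Spec_get_resident_evaluation get_resident_evaluation get_resident_evaluation_alt
  simp only []
  rw [pv_loopA_eq_fold, pv_fold_step]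
  have hs : ∀ (l : List String), PySem.List.slice l none (some 4) = l.take 4 := fun l => by
    exact_mod_cast PySem.List.slice_to_natCast l 4
  simp [hs]
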